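-- pv_equiv track=rewrite | github.com/pastor-robert/misc | python/comp/comp.py | composition
-- ===== SOURCE A (Python) =====
-- def composition(seq):
--     seq = tuple(seq)
--     for i in range(int(2**(len(seq)-1))):
--         result = [[seq[0]]]
--         for j in range(len(seq)-1):
--             if i & (1<<j):
--                 result.append([seq[j+1]])
--             else:
--                 result[-1].append(seq[j+1])
--         yield result
-- ===== SOURCE B (Python) =====
-- def composition(seq):
--     seq = list(seq)
--     if not seq:
--         return
--     comps = [[[seq[0]]]]
--     for x in seq[1:]:
--         comps = [c[:-1] + [c[-1] + [x]] for c in comps] + [c + [[x]] for c in comps]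
--     for c in comps:
--         yield [block[:] for block in c]
-- ===== Notes on version B (the rewrite author's own statement) =====
-- stated objective: alternative
-- what changed: Replaces A's enumeration of 2^(n-1) bitmasks (rebuilding each composition element-by-element from the bits of i) with one incremental pass over the elements that doubles the composition list at each element (append-to-last-block copies first, then new-block copies), reproducing A's binary-counting order.
import Mathlib
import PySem

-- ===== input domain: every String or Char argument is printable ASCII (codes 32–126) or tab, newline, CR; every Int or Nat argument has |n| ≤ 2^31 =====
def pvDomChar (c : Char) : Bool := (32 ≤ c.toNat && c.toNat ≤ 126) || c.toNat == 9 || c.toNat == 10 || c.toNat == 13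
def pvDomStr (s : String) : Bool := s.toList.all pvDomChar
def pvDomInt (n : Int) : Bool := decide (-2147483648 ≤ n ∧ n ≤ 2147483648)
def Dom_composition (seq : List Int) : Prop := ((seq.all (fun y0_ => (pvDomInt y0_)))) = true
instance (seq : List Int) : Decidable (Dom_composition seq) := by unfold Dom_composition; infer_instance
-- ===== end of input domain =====

-- B replaces A's 2^(n-1) bitmask enumeration (each composition rebuilt from the bits of i)
-- by a single incremental doubling pass over the elements; equal values, same asymptotic cost.

-- ===== PORT A =====
-- seq[k] for a nonnegative index the loops keep in range (default never read there)
def pvSeqAt (seq : List Int) (k : Nat) : Int := (PySem.List.pyGet? seq (Int.ofNat k)).getD 0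

-- 'result[-1].append(v)' on a list of blocks (result is nonempty wherever A uses it)
def pvGrowLast (r : List (List Int)) (v : Int) : List (List Int) := r.dropLast ++ [r.getLastD [] ++ [v]]

-- the body of A's outer loop: build the composition selected by the bits of i
def pvBuildA (seq : List Int) (i : Nat) : List (List Int) :=
  (List.range (seq.length - 1)).foldl
    (fun result j =>
      if i.testBit j then result ++ [[pvSeqAt seq (j + 1)]]
      else pvGrowLast result (pvSeqAt seq (j + 1)))
    [[pvSeqAt seq 0]]

-- int(2**(len(seq)-1)) is 0 for the empty seq (int(0.5) = 0), else 2^(len-1);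
-- i & (1 << j) ≠ 0 is i.testBit j; the generator's yields collected into a list.
def composition (seq : List Int) : List (List (List Int)) :=
  (List.range (if seq.length = 0 then 0 else 2 ^ (seq.length - 1))).map (pvBuildA seq)

-- ===== PORT B =====
-- one doubling step: every composition with y appended to its last block, then every one with [y] as a new block
def pvStepB (comps : List (List (List Int))) (y : Int) : List (List (List Int)) :=
  comps.map (fun c => pvGrowLast c y) ++ comps.map (fun c => c ++ [[y]])

def composition_alt (seq : List Int) : List (List (List Int)) :=
  match seq with
  | [] => []
  | x :: rest => rest.foldl pvStepB [[[x]]]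

-- ===== PRECONDITION & SPEC =====
def Spec_composition (seq : List Int) (out : List (List (List Int))) : Prop := out = composition_alt seq
instance (seq : List Int) (out : List (List (List Int))) : Decidable (Spec_composition seq out) := by unfold Spec_composition; infer_instance

-- ===== CLAIM (what is proved, stated in full; the proofs are below) =====
def Claim_equal_composition : Prop := ∀ (seq : List Int), Dom_composition seq → Spec_composition seq (composition seq)

-- ===== LEMMAS AND PROOFS =====

theorem pvSeqAt_eq_getD (seq : List Int) (k : Nat) : pvSeqAt seq k = seq.getD k 0 := by
  simp [pvSeqAt, PySem.List.pyGet?_natCast, List.getD]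

-- the first m steps of pvBuildA only look at seq up to index m, so a snoc does not change them
theorem pvBuildA_prefix (x y : Int) (ys : List Int) (i : Nat) :
    (List.range ys.length).foldl
      (fun result j =>
        if i.testBit j then result ++ [[pvSeqAt (x :: (ys ++ [y])) (j + 1)]]
        else pvGrowLast result (pvSeqAt (x :: (ys ++ [y])) (j + 1)))
      [[pvSeqAt (x :: (ys ++ [y])) 0]] = pvBuildA (x :: ys) i := by
  unfold pvBuildA
  have h0 : pvSeqAt (x :: (ys ++ [y])) 0 = pvSeqAt (x :: ys) 0 := by
    simp [pvSeqAt_eq_getD]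
  have hlen : (x :: ys).length - 1 = ys.length := by simp
  rw [h0, hlen]
  refine PySem.List.foldl_congr_mem _ _ _ _ ?_
  intro acc j hj
  have hj' : j < ys.length := List.mem_range.mp hj
  have : pvSeqAt (x :: (ys ++ [y])) (j + 1) = pvSeqAt (x :: ys) (j + 1) := by
    simp [pvSeqAt_eq_getD, List.getD, List.getElem?_append_left hj']
  rw [this]

theorem pvBuildA_snoc_lo (x y : Int) (ys : List Int) (i : Nat) (hi : i < 2 ^ ys.length) :
    pvBuildA (x :: (ys ++ [y])) i = pvGrowLast (pvBuildA (x :: ys) i) y := by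
  have hlen : (x :: (ys ++ [y])).length - 1 = ys.length + 1 := by simp
  conv_lhs => unfold pvBuildA
  rw [hlen, List.range_succ, List.foldl_append]
  simp only [List.foldl_cons, List.foldl_nil]
  rw [Nat.testBit_lt_two_pow hi]
  simp only [if_neg (Bool.false_ne_true)]
  have hy : pvSeqAt (x :: (ys ++ [y])) (ys.length + 1) = y := by
    simp [pvSeqAt_eq_getD, List.getD]
  rw [hy, pvBuildA_prefix x y ys i]

theorem pvBuildA_snoc_hi (x y : Int) (ys : List Int) (i : Nat) (hi : i < 2 ^ ys.length) :
    pvBuildA (x :: (ys ++ [y])) (2 ^ ys.length + i) = pvBuildA (x :: ys) i ++ [[y]] := by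
  have hlen : (x :: (ys ++ [y])).length - 1 = ys.length + 1 := by simp
  conv_lhs => unfold pvBuildA
  rw [hlen, List.range_succ, List.foldl_append]
  simp only [List.foldl_cons, List.foldl_nil]
  have hy : pvSeqAt (x :: (ys ++ [y])) (ys.length + 1) = y := by
    simp [pvSeqAt_eq_getD, List.getD]
  have hpre :
      (List.range ys.length).foldl
        (fun result j =>
          if (2 ^ ys.length + i).testBit j then result ++ [[pvSeqAt (x :: (ys ++ [y])) (j + 1)]]
          else pvGrowLast result (pvSeqAt (x :: (ys ++ [y])) (j + 1)))
        [[pvSeqAt (x :: (ys ++ [y])) 0]] = pvBuildA (x :: ys) i := by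
    rw [← pvBuildA_prefix x y ys i]
    refine PySem.List.foldl_congr_mem _ _ _ _ ?_
    intro acc j hj
    rw [Nat.testBit_two_pow_add_gt (List.mem_range.mp hj) i]
  rw [hpre, hy, Nat.testBit_two_pow_add_eq, Nat.testBit_lt_two_pow hi]
  simp

-- main invariant: the doubling fold over rest equals the bitmask enumeration over x :: rest
theorem pvMain (x : Int) (rest : List Int) :
    rest.foldl pvStepB [[[x]]] = (List.range (2 ^ rest.length)).map (pvBuildA (x :: rest)) := by
  induction rest using List.reverseRecOn with
  | nil =>
    simp [pvBuildA, pvSeqAt_eq_getD]  -- range 1 = [0]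
  | append_singleton ys y ih =>
    rw [List.foldl_append, List.foldl_cons, List.foldl_nil, ih]
    have hlen : (ys ++ [y]).length = ys.length + 1 := by simp
    rw [hlen, pow_succ, mul_two, List.range_add]
    unfold pvStepB
    rw [List.map_append, List.map_map, List.map_map, List.map_map]
    congr 1
    · refine List.map_congr_left ?_
      intro i hi
      exact (pvBuildA_snoc_lo x y ys i (List.mem_range.mp hi)).symm
    · refine List.map_congr_left ?_
      intro i hi
      exact (pvBuildA_snoc_hi x y ys i (List.mem_range.mp hi)).symm

-- ===== VERDICT (by name: the statement is the Claim_ definition above) =====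
theorem composition_spec : Claim_equal_composition := by
  intro seq _
  unfold Spec_composition
  cases seq with
  | nil => rfl
  | cons x rest =>
    show composition (x :: rest) = composition_alt (x :: rest)
    unfold composition composition_alt
    simp only [List.length_cons, Nat.add_sub_cancel]
    rw [if_neg (by simp), pvMain]
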